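-- pv_equiv track=rewrite | github.com/xiao-zentith/TsyFSpectrumClassify | fix_regression_dataset_info.py | filter_files_by_config
-- ===== SOURCE A (Python) =====
-- def filter_files_by_config(excel_files, config_type):
--     """Filter Excel files based on configuration type."""
--     filtered = {'input': [], 'targets': []}
--
--     if config_type == 'ALL':
--         # ALL includes all types
--         for subdir, files in excel_files.items():
--             if subdir == 'dataset_raw':
--                 filtered['input'].extend(files)
--             elif subdir == 'dataset_target':
--                 filtered['targets'].extend(files)
--     elif config_type in ['C6_FITC', 'C6_HPTS']:
--         # Filter for C6 related files
--         for subdir, files in excel_files.items():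
--             c6_files = [f for f in files if 'C6' in f or 'c6' in f]
--             if config_type == 'C6_FITC':
--                 c6_files = [f for f in c6_files if 'FITC' in f or 'fitc' in f]
--             elif config_type == 'C6_HPTS':
--                 c6_files = [f for f in c6_files if 'HPTS' in f or 'hpts' in f]
--
--             if subdir == 'dataset_raw':
--                 filtered['input'].extend(c6_files)
--             elif subdir == 'dataset_target':
--                 filtered['targets'].extend(c6_files)
--     elif config_type == 'FITC_HPTS':
--         # Filter for FITC+HPTS files
--         for subdir, files in excel_files.items():
--             fitc_hpts_files = [f for f in files if ('FITC' in f and 'HPTS' in f) or ('fitc' in f and 'hpts' in f)]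
--             if subdir == 'dataset_raw':
--                 filtered['input'].extend(fitc_hpts_files)
--             elif subdir == 'dataset_target':
--                 filtered['targets'].extend(fitc_hpts_files)
--     elif config_type == 'Fish':
--         # Filter for Fish related files
--         for subdir, files in excel_files.items():
--             fish_files = [f for f in files if 'Fish' in f or 'fish' in f]
--             if subdir == 'dataset_raw':
--                 filtered['input'].extend(fish_files)
--             elif subdir == 'dataset_target':
--                 filtered['targets'].extend(fish_files)
--
--     return filtered
-- ===== SOURCE B (Python) =====
-- def filter_files_by_config(excel_files, config_type):
--     """Filter Excel files based on configuration type."""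
--     predicates = {
--         'ALL': lambda f: True,
--         'C6_FITC': lambda f: ('C6' in f or 'c6' in f) and ('FITC' in f or 'fitc' in f),
--         'C6_HPTS': lambda f: ('C6' in f or 'c6' in f) and ('HPTS' in f or 'hpts' in f),
--         'FITC_HPTS': lambda f: ('FITC' in f and 'HPTS' in f) or ('fitc' in f and 'hpts' in f),
--         'Fish': lambda f: 'Fish' in f or 'fish' in f,
--     }
--     pred = predicates.get(config_type)
--     if pred is None:
--         return {'input': [], 'targets': []}
--
--     def collect(wanted_subdir):
--         return [f for subdir, files in excel_files.items()
--                 if subdir == wanted_subdir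
--                 for f in files if pred(f)]
--
--     return {'input': collect('dataset_raw'), 'targets': collect('dataset_target')}
-- ===== Notes on version B (the rewrite author's own statement) =====
-- stated objective: simpler
-- what changed: Replaces the four config-specific loops with extend/intermediate filtered lists by a single predicate table selected once from config_type plus one flat comprehension per output key (unknown config short-circuits to empty without looping).
import Mathlib
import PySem

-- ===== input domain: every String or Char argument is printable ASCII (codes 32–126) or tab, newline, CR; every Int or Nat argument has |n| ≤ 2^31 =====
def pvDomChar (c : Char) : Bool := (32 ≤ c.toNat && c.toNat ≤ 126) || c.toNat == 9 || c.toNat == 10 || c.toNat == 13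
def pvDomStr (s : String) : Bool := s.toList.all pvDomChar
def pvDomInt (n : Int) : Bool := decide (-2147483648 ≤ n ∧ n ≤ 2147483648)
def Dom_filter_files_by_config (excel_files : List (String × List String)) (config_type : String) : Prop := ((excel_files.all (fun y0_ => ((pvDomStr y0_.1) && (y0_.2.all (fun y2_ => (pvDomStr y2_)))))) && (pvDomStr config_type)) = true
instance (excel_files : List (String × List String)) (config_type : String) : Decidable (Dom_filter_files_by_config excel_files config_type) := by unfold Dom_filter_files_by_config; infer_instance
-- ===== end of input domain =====

-- B replaces A's four config-specific loops by one predicate chosen from config_type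
-- and a single flat filter per output key (objective: simpler).  Return value only.

-- ===== PORT A =====
-- A keeps filtered = {'input': [], 'targets': []} and extends its two lists in one pass;
-- ported as a pair accumulator, rebuilt as the two-key association list at the end.
def filter_files_by_config (excel_files : List (String × List String)) (config_type : String) : List (String × List String) :=
  let filtered : List String × List String := ([], [])
  let filtered :=
    if config_type == "ALL" then
      excel_files.foldl (fun acc p =>
        if p.1 == "dataset_raw" then (acc.1 ++ p.2, acc.2)
        else if p.1 == "dataset_target" then (acc.1, acc.2 ++ p.2)
        else acc) filtered
    else if config_type == "C6_FITC" || config_type == "C6_HPTS" then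
      excel_files.foldl (fun acc p =>
        let c6_files := p.2.filter (fun f => PySem.Str.isIn "C6" f || PySem.Str.isIn "c6" f)
        let c6_files :=
          if config_type == "C6_FITC" then
            c6_files.filter (fun f => PySem.Str.isIn "FITC" f || PySem.Str.isIn "fitc" f)
          else if config_type == "C6_HPTS" then
            c6_files.filter (fun f => PySem.Str.isIn "HPTS" f || PySem.Str.isIn "hpts" f)
          else c6_files
        if p.1 == "dataset_raw" then (acc.1 ++ c6_files, acc.2)
        else if p.1 == "dataset_target" then (acc.1, acc.2 ++ c6_files)
        else acc) filtered
    else if config_type == "FITC_HPTS" then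
      excel_files.foldl (fun acc p =>
        let fh := p.2.filter (fun f =>
          (PySem.Str.isIn "FITC" f && PySem.Str.isIn "HPTS" f) ||
          (PySem.Str.isIn "fitc" f && PySem.Str.isIn "hpts" f))
        if p.1 == "dataset_raw" then (acc.1 ++ fh, acc.2)
        else if p.1 == "dataset_target" then (acc.1, acc.2 ++ fh)
        else acc) filtered
    else if config_type == "Fish" then
      excel_files.foldl (fun acc p =>
        let fish := p.2.filter (fun f => PySem.Str.isIn "Fish" f || PySem.Str.isIn "fish" f)
        if p.1 == "dataset_raw" then (acc.1 ++ fish, acc.2)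
        else if p.1 == "dataset_target" then (acc.1, acc.2 ++ fish)
        else acc) filtered
    else filtered
  [("input", filtered.1), ("targets", filtered.2)]

-- ===== PORT B =====
-- predicates.get(config_type): the per-file predicate, none for an unknown config
def pvPredFor (config_type : String) : Option (String → Bool) :=
  if config_type == "ALL" then some (fun _ => true)
  else if config_type == "C6_FITC" then
    some (fun f => (PySem.Str.isIn "C6" f || PySem.Str.isIn "c6" f) &&
                   (PySem.Str.isIn "FITC" f || PySem.Str.isIn "fitc" f))
  else if config_type == "C6_HPTS" then
    some (fun f => (PySem.Str.isIn "C6" f || PySem.Str.isIn "c6" f) &&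
                   (PySem.Str.isIn "HPTS" f || PySem.Str.isIn "hpts" f))
  else if config_type == "FITC_HPTS" then
    some (fun f => (PySem.Str.isIn "FITC" f && PySem.Str.isIn "HPTS" f) ||
                   (PySem.Str.isIn "fitc" f && PySem.Str.isIn "hpts" f))
  else if config_type == "Fish" then
    some (fun f => PySem.Str.isIn "Fish" f || PySem.Str.isIn "fish" f)
  else none

-- collect(wanted_subdir): the flat comprehension over matching subdirs
def pvCollect (excel_files : List (String × List String)) (pred : String → Bool)
    (wanted_subdir : String) : List String :=
  (excel_files.filter (fun p => p.1 == wanted_subdir)).flatMap (fun p => p.2.filter pred)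

def filter_files_by_config_alt (excel_files : List (String × List String)) (config_type : String) : List (String × List String) :=
  match pvPredFor config_type with
  | none => [("input", []), ("targets", [])]
  | some pred =>
      [("input", pvCollect excel_files pred "dataset_raw"),
       ("targets", pvCollect excel_files pred "dataset_target")]

-- ===== PRECONDITION & SPEC =====
def Spec_filter_files_by_config (excel_files : List (String × List String)) (config_type : String) (out : List (String × List String)) : Prop := out = filter_files_by_config_alt excel_files config_type
instance (excel_files : List (String × List String)) (config_type : String) (out : List (String × List String)) : Decidable (Spec_filter_files_by_config excel_files config_type out) := by unfold Spec_filter_files_by_config; infer_instance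

-- ===== CLAIM (what is proved, stated in full; the proofs are below) =====
def Claim_equal_filter_files_by_config : Prop := ∀ (excel_files : List (String × List String)) (config_type : String), Dom_filter_files_by_config excel_files config_type → Spec_filter_files_by_config excel_files config_type (filter_files_by_config excel_files config_type)

-- ===== LEMMAS AND PROOFS =====
-- A's accumulating pass, for any per-entry filtering g, splits into the two flat collections.
theorem pvFoldl_split (g : List String → List String) (l : List (String × List String))
    (acc : List String × List String) :
    l.foldl (fun acc p =>
        if p.1 = "dataset_raw" then (acc.1 ++ g p.2, acc.2)
        else if p.1 = "dataset_target" then (acc.1, acc.2 ++ g p.2)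
        else acc) acc
      = (acc.1 ++ (l.filter (fun p => p.1 == "dataset_raw")).flatMap (fun p => g p.2),
         acc.2 ++ (l.filter (fun p => p.1 == "dataset_target")).flatMap (fun p => g p.2)) := by
  induction l generalizing acc with
  | nil => simp
  | cons p t ih =>
      simp only [List.foldl_cons, List.filter_cons]
      by_cases h1 : p.1 = "dataset_raw"
      · have h2 : ¬ p.1 = "dataset_target" := by simp [h1]
        simp [h1, ih]
      · by_cases h2 : p.1 = "dataset_target"
        · simp [h2, ih]
        · simp [h1, h2, ih]

-- ===== VERDICT (by name: the statement is the Claim_ definition above) =====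
theorem filter_files_by_config_spec : Claim_equal_filter_files_by_config := by
  intro excel_files config_type _
  unfold Spec_filter_files_by_config filter_files_by_config filter_files_by_config_alt pvPredFor pvCollect
  by_cases hAll : config_type = "ALL"
  · simp [hAll, pvFoldl_split (g := fun fs => fs)]
  · by_cases hCF : config_type = "C6_FITC"
    · simp [hCF, List.filter_filter, Bool.and_comm,
        pvFoldl_split (g := fun fs => fs.filter (fun f =>
          (PySem.Chars.isIn ['C','6'] f.toList || PySem.Chars.isIn ['c','6'] f.toList) &&
          (PySem.Chars.isIn ['F','I','T','C'] f.toList || PySem.Chars.isIn ['f','i','t','c'] f.toList)))]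
    · by_cases hCH : config_type = "C6_HPTS"
      · simp [hCH, List.filter_filter, Bool.and_comm,
          pvFoldl_split (g := fun fs => fs.filter (fun f =>
            (PySem.Chars.isIn ['C','6'] f.toList || PySem.Chars.isIn ['c','6'] f.toList) &&
            (PySem.Chars.isIn ['H','P','T','S'] f.toList || PySem.Chars.isIn ['h','p','t','s'] f.toList)))]
      · by_cases hFH : config_type = "FITC_HPTS"
        · simp [hFH, pvFoldl_split (g := fun fs => fs.filter (fun f =>
            (PySem.Chars.isIn ['F','I','T','C'] f.toList && PySem.Chars.isIn ['H','P','T','S'] f.toList) ||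
            (PySem.Chars.isIn ['f','i','t','c'] f.toList && PySem.Chars.isIn ['h','p','t','s'] f.toList)))]
        · by_cases hFish : config_type = "Fish"
          · simp [hFish, pvFoldl_split (g := fun fs => fs.filter (fun f =>
              PySem.Chars.isIn ['F','i','s','h'] f.toList || PySem.Chars.isIn ['f','i','s','h'] f.toList))]
          · simp [hAll, hCF, hCH, hFH, hFish]
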